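-- pv_equiv track=rewrite | github.com/wilmurillo-ai/Design-Assistant | .skills/openclaw-skills/skills/kevin850115/aliyun-domain/scripts/domain_hotspot_analyzer.py | _get_investment_reason
-- ===== SOURCE A (Python) =====
-- def _get_investment_reason(domain: str) -> str:
--     """获取投资理由"""
--     if 'agent' in domain or 'bot' in domain:
--         return "🤖 AI 智能体热点"
--     elif 'ai' in domain:
--         return "🧠 AI 概念"
--     elif 'dev' in domain or 'code' in domain:
--         return "💻 开发者工具"
--     elif 'io' in domain:
--         return "⚡ 科技创业首选"
--     elif 'xyz' in domain:
--         return "💰 经济实惠"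
--     elif any(num in domain for num in ['168', '518', '678', '886']):
--         return "🔢 吉利数字"
--     else:
--         return "📌 简短易记"
-- ===== SOURCE B (Python) =====
-- ENTRIES = [
--     (0, 'agent', "🤖 AI 智能体热点"),
--     (0, 'bot',   "🤖 AI 智能体热点"),
--     (1, 'ai',    "🧠 AI 概念"),
--     (2, 'dev',   "💻 开发者工具"),
--     (2, 'code',  "💻 开发者工具"),
--     (3, 'io',    "⚡ 科技创业首选"),
--     (4, 'xyz',   "💰 经济实惠"),
--     (5, '168',   "🔢 吉利数字"),
--     (5, '518',   "🔢 吉利数字"),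
--     (5, '678',   "🔢 吉利数字"),
--     (5, '886',   "🔢 吉利数字"),
-- ]
--
-- def _get_investment_reason(domain: str) -> str:
--     """获取投资理由"""
--     candidates = [(p, r) for p, k, r in ENTRIES if k in domain]
--     candidates.append((6, "📌 简短易记"))
--     return min(candidates, key=lambda t: t[0])[1]
-- ===== Notes on version B (the rewrite author's own statement) =====
-- stated objective: alternative
-- what changed: Instead of an early-return if/elif ladder, B collects ALL matching keyword entries into a candidate list (plus a default sentinel) and selects the reason of minimal priority with a single min-by-key; no short-circuiting, priority numbers replace branch order.
import Mathlib
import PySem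

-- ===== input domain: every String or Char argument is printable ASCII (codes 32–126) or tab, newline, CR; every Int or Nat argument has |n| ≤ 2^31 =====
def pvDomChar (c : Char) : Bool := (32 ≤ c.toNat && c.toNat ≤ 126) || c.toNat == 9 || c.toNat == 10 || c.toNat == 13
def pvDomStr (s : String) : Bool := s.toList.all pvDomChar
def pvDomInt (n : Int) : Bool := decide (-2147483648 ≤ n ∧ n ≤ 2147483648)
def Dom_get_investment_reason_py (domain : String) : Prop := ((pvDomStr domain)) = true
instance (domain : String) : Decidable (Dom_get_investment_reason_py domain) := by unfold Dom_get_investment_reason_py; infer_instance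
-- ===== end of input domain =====

-- B replaces A's early-return if/elif ladder by collecting all matching keyword entries plus a
-- default sentinel into a candidate list and taking the reason of minimal priority (alternative; same cost).


-- ===== PORT A =====
def get_investment_reason_py (domain : String) : String :=
  if PySem.Str.isIn "agent" domain || PySem.Str.isIn "bot" domain then "🤖 AI 智能体热点"
  else if PySem.Str.isIn "ai" domain then "🧠 AI 概念"
  else if PySem.Str.isIn "dev" domain || PySem.Str.isIn "code" domain then "💻 开发者工具"
  else if PySem.Str.isIn "io" domain then "⚡ 科技创业首选"
  else if PySem.Str.isIn "xyz" domain then "💰 经济实惠"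
  else if (["168", "518", "678", "886"].any (fun num => PySem.Str.isIn num domain)) then "🔢 吉利数字"
  else "📌 简短易记"

-- ===== PORT B =====
-- B-side: (priority, keyword, reason) table; all matches become candidates, min priority wins
def pvEntries : List (Int × String × String) :=
  [ (0, "agent", "🤖 AI 智能体热点")
  , (0, "bot",   "🤖 AI 智能体热点")
  , (1, "ai",    "🧠 AI 概念")
  , (2, "dev",   "💻 开发者工具")
  , (2, "code",  "💻 开发者工具")
  , (3, "io",    "⚡ 科技创业首选")
  , (4, "xyz",   "💰 经济实惠")
  , (5, "168",   "🔢 吉利数字")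
  , (5, "518",   "🔢 吉利数字")
  , (5, "678",   "🔢 吉利数字")
  , (5, "886",   "🔢 吉利数字") ]

def get_investment_reason_py_alt (domain : String) : String :=
  let candidates :=
    ((pvEntries.filter (fun e => PySem.Str.isIn e.2.1 domain)).map (fun e => (e.1, e.2.2)))
      ++ [((6 : Int), "📌 简短易记")]
  match PySem.List.min? candidates (fun t => t.1) with
  | some t => t.2
  | none => ""   -- unreachable: candidates always contains the sentinel

-- ===== PRECONDITION & SPEC =====
def Spec_get_investment_reason_py (domain : String) (out : String) : Prop := out = get_investment_reason_py_alt domain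
instance (domain : String) (out : String) : Decidable (Spec_get_investment_reason_py domain out) := by unfold Spec_get_investment_reason_py; infer_instance

-- ===== CLAIM =====
def Claim_equal_get_investment_reason_py : Prop := ∀ (domain : String), Dom_get_investment_reason_py domain → Spec_get_investment_reason_py domain (get_investment_reason_py domain)

-- ===== LEMMAS AND PROOFS =====

-- A's ladder with the eleven substring tests abstracted into booleans
def pvLadder (b1 b2 b3 b4 b5 b6 b7 b8 b9 b10 b11 : Bool) : String :=
  if b1 || b2 then "🤖 AI 智能体热点"
  else if b3 then "🧠 AI 概念"
  else if b4 || b5 then "💻 开发者工具"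
  else if b6 then "⚡ 科技创业首选"
  else if b7 then "💰 经济实惠"
  else if b8 || (b9 || (b10 || (b11 || false))) then "🔢 吉利数字"
  else "📌 简短易记"

-- B's candidate build + min with the eleven substring tests abstracted into booleans
def pvPick (b1 b2 b3 b4 b5 b6 b7 b8 b9 b10 b11 : Bool) : String :=
  let t11 : List (Int × String × String) := cond b11 [(5, "886", "🔢 吉利数字")] []
  let t10 := cond b10 ((5, "678", "🔢 吉利数字") :: t11) t11
  let t9  := cond b9  ((5, "518", "🔢 吉利数字") :: t10) t10
  let t8  := cond b8  ((5, "168", "🔢 吉利数字") :: t9) t9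
  let t7  := cond b7  ((4, "xyz", "💰 经济实惠") :: t8) t8
  let t6  := cond b6  ((3, "io", "⚡ 科技创业首选") :: t7) t7
  let t5  := cond b5  ((2, "code", "💻 开发者工具") :: t6) t6
  let t4  := cond b4  ((2, "dev", "💻 开发者工具") :: t5) t5
  let t3  := cond b3  ((1, "ai", "🧠 AI 概念") :: t4) t4
  let t2  := cond b2  ((0, "bot", "🤖 AI 智能体热点") :: t3) t3
  let t1  := cond b1  ((0, "agent", "🤖 AI 智能体热点") :: t2) t2
  let candidates := (t1.map (fun e => (e.1, e.2.2))) ++ [((6 : Int), "📌 简短易记")]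
  match PySem.List.min? candidates (fun t => t.1) with
  | some t => t.2
  | none => ""

theorem pvA_abs (domain : String) :
    get_investment_reason_py domain =
      pvLadder (PySem.Str.isIn "agent" domain) (PySem.Str.isIn "bot" domain)
        (PySem.Str.isIn "ai" domain) (PySem.Str.isIn "dev" domain) (PySem.Str.isIn "code" domain)
        (PySem.Str.isIn "io" domain) (PySem.Str.isIn "xyz" domain) (PySem.Str.isIn "168" domain)
        (PySem.Str.isIn "518" domain) (PySem.Str.isIn "678" domain) (PySem.Str.isIn "886" domain) := rfl

theorem pvB_abs (domain : String) :
    get_investment_reason_py_alt domain =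
      pvPick (PySem.Str.isIn "agent" domain) (PySem.Str.isIn "bot" domain)
        (PySem.Str.isIn "ai" domain) (PySem.Str.isIn "dev" domain) (PySem.Str.isIn "code" domain)
        (PySem.Str.isIn "io" domain) (PySem.Str.isIn "xyz" domain) (PySem.Str.isIn "168" domain)
        (PySem.Str.isIn "518" domain) (PySem.Str.isIn "678" domain) (PySem.Str.isIn "886" domain) := rfl

theorem pvLadder_eq_pvPick :
    ∀ b1 b2 b3 b4 b5 b6 b7 b8 b9 b10 b11 : Bool,
      pvLadder b1 b2 b3 b4 b5 b6 b7 b8 b9 b10 b11 = pvPick b1 b2 b3 b4 b5 b6 b7 b8 b9 b10 b11 := by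
  decide

-- ===== VERDICT =====
theorem get_investment_reason_py_spec : Claim_equal_get_investment_reason_py := by
  intro domain _
  unfold Spec_get_investment_reason_py
  rw [pvA_abs, pvB_abs, pvLadder_eq_pvPick]
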